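-- pv_equiv track=rewrite | github.com/joaobose/algorithm-design-I-personal | tareas/tarea-4/pregunta-2-implementacion.py | good_subarrays_optim
-- ===== SOURCE A (Python) =====
-- def good_subarrays_optim(A):
--     n = len(A)
--     b = [0] * (n + 1)
--     b_prev = [0] * (n + 1)
--     count = 0
--
--     # Casos base
--     for j in range(1, n + 1):
--         b[j] = j
--     count += b[n]
--
--     # Llenar la tabla
--     for i in range(2, n + 1):
--         b, b_prev = b_prev, b
--
--         for j in range(1, n + 1):
--             b[j] = b_prev[j - 1] if A[j - 1] % i == 0 else 0
--             b[j] += b[j - 1]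
--
--         count += b[n]
--
--     return count
-- ===== SOURCE B (Python) =====
-- def good_subarrays_optim(A):
--     # One left-to-right pass; dp[k] = number of good chains of length k
--     # among the elements seen so far (position-1 element is unchecked).
--     n = len(A)
--     dp = [0] * (n + 1)
--     for j in range(n):
--         x = A[j]
--         for k in range(min(j + 1, n), 1, -1):
--             if x % k == 0:
--                 dp[k] += dp[k - 1]
--         dp[1] += 1
--     return sum(dp)
-- ===== Notes on version B (the rewrite author's own statement) =====
-- stated objective: faster
-- what changed: Replaces A's length-indexed pair of prefix-sum DP tables (one full pass over the array per chain length, always writing all n cells) by a single left-to-right pass over the array that updates one dp-by-length vector in place (descending k, touching dp[k] only when the divisibility test passes and k can occur), then sums the vector.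
import Mathlib
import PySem

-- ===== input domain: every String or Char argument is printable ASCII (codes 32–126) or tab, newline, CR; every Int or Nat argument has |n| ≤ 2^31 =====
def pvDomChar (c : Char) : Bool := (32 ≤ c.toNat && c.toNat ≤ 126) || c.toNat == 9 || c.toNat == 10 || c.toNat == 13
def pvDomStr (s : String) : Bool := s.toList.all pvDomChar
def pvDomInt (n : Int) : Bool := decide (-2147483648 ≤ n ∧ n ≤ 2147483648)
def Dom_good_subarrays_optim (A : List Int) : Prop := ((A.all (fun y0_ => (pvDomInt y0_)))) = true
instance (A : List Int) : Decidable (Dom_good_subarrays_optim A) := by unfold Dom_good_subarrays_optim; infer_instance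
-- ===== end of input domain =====

-- B replaces A's length-indexed pair of prefix-sum DP tables (one full pass per
-- chain length) by a single left-to-right pass maintaining one dp-by-length
-- vector in place; measurably faster by a constant factor. Return values only
-- (neither program mutates its argument).

-- ===== PORT A =====
-- inner loop "for j in range(1, n + 1): b[j] = ...; b[j] += b[j-1]".
-- All indices (j, j-1 into b/bPrev of length n+1, j-1 into A) are in range for
-- every j produced by range(1, n+1), so plain List.set / List.getD is exact here.
def gsoInner (A : List Int) (n : Nat) (i : Nat) (bPrev : List Int) (b : List Int) : List Int :=
  (List.range' 1 n).foldl
    (fun b j =>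
      b.set j ((if PySem.Int.mod (A.getD (j - 1) 0) (i : Int) == 0 then bPrev.getD (j - 1) 0 else 0)
               + b.getD (j - 1) 0))
    b

def good_subarrays_optim (A : List Int) : Int :=
  let n := A.length
  let b : List Int := List.replicate (n + 1) 0
  let bPrev : List Int := List.replicate (n + 1) 0
  let count : Int := 0
  -- Casos base: for j in range(1, n + 1): b[j] = j
  let b := (List.range' 1 n).foldl (fun b j => b.set j (j : Int)) b
  let count := count + b.getD n 0
  -- for i in range(2, n + 1): swap b/b_prev, fill, count += b[n]
  let st := (List.range' 2 (n - 1)).foldl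
    (fun (st : List Int × List Int × Int) i =>
      let b := st.1; let bPrev := st.2.1; let count := st.2.2
      -- b, b_prev = b_prev, b
      let b2 := bPrev; let bPrev2 := b
      let b3 := gsoInner A n i bPrev2 b2
      (b3, bPrev2, count + b3.getD n 0))
    (b, bPrev, count)
  st.2.2

-- ===== PORT B =====
-- inner loop "for k in range(min(j + 1, n), 1, -1): if x % k == 0: dp[k] += dp[k-1]".
-- range(K, 1, -1) is [K, K-1, ..., 2] = (List.range' 2 (K-1)).reverse; indices in range.
def gsoAltInner (x : Int) (K : Nat) (dp : List Int) : List Int :=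
  ((List.range' 2 (K - 1)).reverse).foldl
    (fun dp (k : Nat) =>
      if PySem.Int.mod x (k : Int) == 0 then dp.set k (dp.getD k 0 + dp.getD (k - 1) 0) else dp)
    dp

def good_subarrays_optim_alt (A : List Int) : Int :=
  let n := A.length
  let dp : List Int := List.replicate (n + 1) 0
  let dp := (List.range n).foldl
    (fun dp j =>
      let x := A.getD j 0      -- x = A[j], j in range(n): in range
      let dp := gsoAltInner x (min (j + 1) n) dp
      dp.set 1 (dp.getD 1 0 + 1))
    dp
  dp.sum

-- ===== PRECONDITION & SPEC =====
def Spec_good_subarrays_optim (A : List Int) (out : Int) : Prop := out = good_subarrays_optim_alt A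
instance (A : List Int) (out : Int) : Decidable (Spec_good_subarrays_optim A out) := by unfold Spec_good_subarrays_optim; infer_instance

-- ===== CLAIM (what is proved, stated in full; the proofs are below) =====
def Claim_equal_good_subarrays_optim : Prop := ∀ (A : List Int), Dom_good_subarrays_optim A → Spec_good_subarrays_optim A (good_subarrays_optim A)

-- ===== LEMMAS AND PROOFS =====

-- pvCnt A i j = number of index chains p₁ < … < p_i within the first j positions
-- of A with A[p_k] % k == 0 for 2 ≤ k ≤ i — the common semantics of both DPs.
def pvCnt (A : List Int) (i : Nat) (j : Nat) : Int :=
  match j, i with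
  | 0, _ => 0
  | _ + 1, 0 => 0
  | j + 1, 1 => pvCnt A 1 j + 1
  | j + 1, i + 2 =>
      pvCnt A (i + 2) j +
        (if PySem.Int.mod (A.getD j 0) ((i : Int) + 2) == 0 then pvCnt A (i + 1) j else 0)

lemma getD_set_self (l : List Int) (n : Nat) (v : Int) (h : n < l.length) :
    (l.set n v).getD n 0 = v := by
  simp [List.getD_eq_getElem?_getD, h]

lemma getD_set_ne (l : List Int) (n m : Nat) (v : Int) (h : n ≠ m) :
    (l.set n v).getD m 0 = l.getD m 0 := by
  simp [List.getD_eq_getElem?_getD, h]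

lemma pvCnt_one (A : List Int) (j : Nat) : pvCnt A 1 j = (j : Int) := by
  induction j with
  | zero => rfl
  | succ j ih => simp [pvCnt, ih]

lemma pvCnt_zero_of_lt (A : List Int) (i j : Nat) (h : j < i) : pvCnt A i j = 0 := by
  induction j generalizing i with
  | zero => cases i <;> rfl
  | succ j ih =>
    rcases i with _ | _ | k
    · omega
    · omega
    · simp [pvCnt, ih (k + 2) (by omega), ih (k + 1) (by omega)]

lemma pvCnt_zero_left (A : List Int) (j : Nat) : pvCnt A 0 j = 0 := by
  cases j <;> rfl

-- A's inner loop invariant (fold from the right over range' 1 m)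
lemma gsoInner_aux (A : List Int) (i : Nat) (bPrev : List Int)
    (hprev : ∀ j ≤ A.length, bPrev.getD j 0 = pvCnt A (i + 1) j)
    (b : List Int) (hbl : b.length = A.length + 1) (hb0 : b.getD 0 0 = 0) :
    ∀ (m : Nat), m ≤ A.length →
      ((List.range' 1 m).foldl
        (fun b j =>
          b.set j ((if PySem.Int.mod (A.getD (j - 1) 0) ((i + 2 : Nat) : Int) == 0 then bPrev.getD (j - 1) 0 else 0)
                   + b.getD (j - 1) 0)) b).length = A.length + 1 ∧
      ∀ j ≤ m,
        ((List.range' 1 m).foldl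
          (fun b j =>
            b.set j ((if PySem.Int.mod (A.getD (j - 1) 0) ((i + 2 : Nat) : Int) == 0 then bPrev.getD (j - 1) 0 else 0)
                     + b.getD (j - 1) 0)) b).getD j 0 = pvCnt A (i + 2) j := by
  intro m
  induction m with
  | zero =>
    intro _
    refine ⟨hbl, ?_⟩
    intro j hj
    interval_cases j
    simpa using hb0
  | succ m ih =>
    intro hm
    obtain ⟨ihl, ihv⟩ := ih (by omega)
    rw [List.range'_1_concat, List.foldl_append]
    set r := (List.range' 1 m).foldl
        (fun b j =>
          b.set j ((if PySem.Int.mod (A.getD (j - 1) 0) ((i + 2 : Nat) : Int) == 0 then bPrev.getD (j - 1) 0 else 0)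
                   + b.getD (j - 1) 0)) b with hr
    simp only [List.foldl_cons, List.foldl_nil]
    have hlen : 1 + m < r.length := by omega
    constructor
    · simpa using ihl
    · intro j hj
      rcases Nat.lt_or_ge j (m + 1) with hj' | hj'
      · rw [getD_set_ne _ _ _ _ (by omega)]
        exact ihv j (by omega)
      · have hjeq : j = m + 1 := by omega
        subst hjeq
        have h1m : (1 + m : Nat) = m + 1 := by omega
        rw [h1m, getD_set_self _ _ _ (by omega)]
        have hsub : (m + 1 - 1 : Nat) = m := by omega
        rw [hsub, hprev m (by omega), ihv m (by omega)]
        have hcast : ((i + 2 : Nat) : Int) = (i : Int) + 2 := by push_cast; ring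
        rw [hcast]
        simp only [pvCnt]
        split_ifs <;> ring

-- B's inner loop invariant (descending fold, peeled from the largest k)
lemma gsoAltInner_aux (A : List Int) (j : Nat) :
    ∀ (c : Nat), 1 + c ≤ A.length → ∀ (dp : List Int), dp.length = A.length + 1 →
      (∀ k ≤ A.length, dp.getD k 0 = if k ≤ 1 + c then pvCnt A k j else pvCnt A k (j + 1)) →
      (((List.range' 2 c).reverse).foldl
        (fun dp (k : Nat) =>
          if PySem.Int.mod (A.getD j 0) (k : Int) == 0 then dp.set k (dp.getD k 0 + dp.getD (k - 1) 0) else dp)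
        dp).length = A.length + 1 ∧
      ∀ k ≤ A.length,
        (((List.range' 2 c).reverse).foldl
          (fun dp (k : Nat) =>
            if PySem.Int.mod (A.getD j 0) (k : Int) == 0 then dp.set k (dp.getD k 0 + dp.getD (k - 1) 0) else dp)
          dp).getD k 0 = if k ≤ 1 then pvCnt A k j else pvCnt A k (j + 1) := by
  intro c
  induction c with
  | zero =>
    intro _ dp hl hdp
    simp only [List.range'_zero, List.reverse_nil, List.foldl_nil]
    refine ⟨hl, ?_⟩
    intro k hk
    rcases Nat.lt_or_ge k 2 with hk2 | hk2
    · have := hdp k hk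
      interval_cases k <;> simpa using this
    · have hv := hdp k hk
      rw [if_neg (by omega : ¬ k ≤ 1 + 0)] at hv
      rw [hv, if_neg (by omega)]
  | succ c ih =>
    intro hc dp hl hdp
    have hcc : (2 + c : Nat) = c + 2 := by omega
    rw [List.range'_1_concat, List.reverse_append, List.reverse_singleton]
    simp only [List.singleton_append, List.foldl_cons]
    set dp' := if PySem.Int.mod (A.getD j 0) ((2 + c : Nat) : Int) == 0 then
        dp.set (2 + c) (dp.getD (2 + c) 0 + dp.getD (2 + c - 1) 0) else dp with hdp'
    have hl' : dp'.length = A.length + 1 := by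
      rw [hdp']; split_ifs <;> simp [hl]
    have hval' : ∀ k ≤ A.length, dp'.getD k 0 = if k ≤ 1 + c then pvCnt A k j else pvCnt A k (j + 1) := by
      intro k hk
      have h2c : dp.getD (2 + c) 0 = pvCnt A (2 + c) j := by
        rw [hdp (2 + c) (by omega), if_pos (by omega)]
      have h1c : dp.getD (2 + c - 1) 0 = pvCnt A (c + 1) j := by
        have : (2 + c - 1 : Nat) = c + 1 := by omega
        rw [this, hdp (c + 1) (by omega), if_pos (by omega)]
      have hcast : ((2 + c : Nat) : Int) = (c : Int) + 2 := by push_cast; ring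
      rcases Nat.lt_or_ge k (2 + c) with hklt | hkge
      · have : dp'.getD k 0 = dp.getD k 0 := by
          rw [hdp']; split_ifs with hcond
          · exact getD_set_ne _ _ _ _ (by omega)
          · rfl
        rw [this, hdp k hk, if_pos (by omega), if_pos (by omega)]
      · rcases Nat.lt_or_ge (2 + c) k with hkgt | hkle
        · have : dp'.getD k 0 = dp.getD k 0 := by
            rw [hdp']; split_ifs with hcond
            · exact getD_set_ne _ _ _ _ (by omega)
            · rfl
          rw [this, hdp k hk, if_neg (by omega), if_neg (by omega)]
        · have hkeq : k = 2 + c := by omega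
          subst hkeq
          rw [if_neg (by omega)]
          have hrec : pvCnt A (2 + c) (j + 1) =
              pvCnt A (2 + c) j +
                (if PySem.Int.mod (A.getD j 0) ((c : Int) + 2) == 0 then pvCnt A (c + 1) j else 0) := by
            rw [hcc]
            simp [pvCnt]
          rw [hdp']
          split_ifs with hcond
          · rw [getD_set_self _ _ _ (by omega), h2c, h1c]
            rw [hrec, if_pos (by rwa [hcast] at hcond)]
          · rw [h2c, hrec, if_neg (by rwa [hcast] at hcond)]
            norm_num
    exact ih (by omega) dp' hl' hval'

-- base-case loop of A: b[j] = j for j in range(1, n+1)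
lemma base_aux (n : Nat) :
    ∀ (m : Nat), m ≤ n →
      ((List.range' 1 m).foldl (fun b j => b.set j (j : Int)) (List.replicate (n + 1) (0 : Int))).length = n + 1 ∧
      ∀ j ≤ m,
        ((List.range' 1 m).foldl (fun b j => b.set j (j : Int)) (List.replicate (n + 1) (0 : Int))).getD j 0 = (j : Int) := by
  intro m
  induction m with
  | zero =>
    intro _
    refine ⟨by simp, ?_⟩
    intro j hj
    interval_cases j
    simp [List.getD_eq_getElem?_getD]
  | succ m ih =>
    intro hm
    obtain ⟨ihl, ihv⟩ := ih (by omega)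
    rw [List.range'_1_concat, List.foldl_append]
    simp only [List.foldl_cons, List.foldl_nil]
    set r := (List.range' 1 m).foldl (fun b j => b.set j (j : Int)) (List.replicate (n + 1) (0 : Int)) with hr
    constructor
    · simpa using ihl
    · intro j hj
      rcases Nat.lt_or_ge j (m + 1) with hj' | hj'
      · rw [getD_set_ne _ _ _ _ (by omega)]
        exact ihv j (by omega)
      · have hjeq : j = m + 1 := by omega
        subst hjeq
        have h1m : (1 + m : Nat) = m + 1 := by omega
        rw [h1m, getD_set_self _ _ _ (by omega)]

lemma sum_eq_sum_getD (l : List Int) :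
    l.sum = ((List.range l.length).map (fun k => l.getD k 0)).sum := by
  induction l with
  | nil => simp
  | cons a t ih =>
    simp [List.range_succ_eq_map, List.map_map, Function.comp_def, ih]

lemma pvCnt_zero_right (A : List Int) (k : Nat) : pvCnt A k 0 = 0 := rfl

-- wrapper: the invariant of gsoInner as a statement about gsoInner itself
lemma gsoInner_spec (A : List Int) (i : Nat) (bPrev b : List Int)
    (hprev : ∀ j ≤ A.length, bPrev.getD j 0 = pvCnt A (i + 1) j)
    (hbl : b.length = A.length + 1) (hb0 : b.getD 0 0 = 0) :
    (gsoInner A A.length (i + 2) bPrev b).length = A.length + 1 ∧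
    ∀ j ≤ A.length, (gsoInner A A.length (i + 2) bPrev b).getD j 0 = pvCnt A (i + 2) j := by
  unfold gsoInner
  exact gsoInner_aux A i bPrev hprev b hbl hb0 A.length le_rfl

-- wrapper: the invariant of gsoAltInner as a statement about gsoAltInner itself
lemma gsoAltInner_spec (A : List Int) (j : Nat) (dp : List Int)
    (hjn : j < A.length) (hl : dp.length = A.length + 1)
    (hdp : ∀ k ≤ A.length, dp.getD k 0 = pvCnt A k j) :
    (gsoAltInner (A.getD j 0) (min (j + 1) A.length) dp).length = A.length + 1 ∧
    ∀ k ≤ A.length, (gsoAltInner (A.getD j 0) (min (j + 1) A.length) dp).getD k 0 =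
      if k ≤ 1 then pvCnt A k j else pvCnt A k (j + 1) := by
  unfold gsoAltInner
  apply gsoAltInner_aux A j (min (j + 1) A.length - 1) (by omega) dp hl
  intro k hk
  rw [hdp k hk]
  by_cases hks : k ≤ 1 + (min (j + 1) A.length - 1)
  · rw [if_pos hks]
  · rw [if_neg hks, pvCnt_zero_of_lt A k j (by omega), pvCnt_zero_of_lt A k (j + 1) (by omega)]

-- the state of A's outer loop after m iterations (zeta-reduced body of the port)
def pvStA (A : List Int) (m : Nat) : List Int × List Int × Int :=
  (List.range' 2 m).foldl
    (fun (st : List Int × List Int × Int) (i : Nat) =>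
      (gsoInner A A.length i st.1 st.2.1, st.1,
        st.2.2 + (gsoInner A A.length i st.1 st.2.1).getD A.length 0))
    ((List.range' 1 A.length).foldl (fun b j => b.set j (j : Int)) (List.replicate (A.length + 1) 0),
     List.replicate (A.length + 1) 0,
     0 + ((List.range' 1 A.length).foldl (fun b j => b.set j (j : Int)) (List.replicate (A.length + 1) 0)).getD A.length 0)

lemma A_outer_aux (A : List Int) :
    ∀ (m : Nat), m ≤ A.length - 1 →
      (pvStA A m).1.length = A.length + 1 ∧ (pvStA A m).2.1.length = A.length + 1 ∧
      (pvStA A m).1.getD 0 0 = 0 ∧ (pvStA A m).2.1.getD 0 0 = 0 ∧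
      (∀ j ≤ A.length, (pvStA A m).1.getD j 0 = pvCnt A (m + 1) j) ∧
      (pvStA A m).2.2 = ((List.range' 1 (m + 1)).map (fun i => pvCnt A i A.length)).sum := by
  intro m
  induction m with
  | zero =>
    intro _
    obtain ⟨h1l, h1v⟩ := base_aux A.length A.length le_rfl
    unfold pvStA
    simp only [List.range'_zero, List.foldl_nil]
    refine ⟨h1l, by simp, ?_, ?_, ?_, ?_⟩
    · simpa using h1v 0 (by omega)
    · simp [List.getD_eq_getElem?_getD]
    · intro j hj
      rw [h1v j hj, pvCnt_one]
    · rw [h1v A.length le_rfl]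
      simp [List.range'_one, pvCnt_one]
  | succ m ih =>
    intro hm
    obtain ⟨ih1, ih2, ih3, ih4, ih5, ih6⟩ := ih (by omega)
    have hstep := gsoInner_spec A m (pvStA A m).1 (pvStA A m).2.1 ih5 ih2 ih4
    have hfold : pvStA A (m + 1) =
        (gsoInner A A.length (2 + m) (pvStA A m).1 (pvStA A m).2.1, (pvStA A m).1,
          (pvStA A m).2.2 + (gsoInner A A.length (2 + m) (pvStA A m).1 (pvStA A m).2.1).getD A.length 0) := by
      unfold pvStA
      rw [List.range'_1_concat, List.foldl_append]
      simp only [List.foldl_cons, List.foldl_nil]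
    rw [Nat.add_comm 2 m] at hfold
    rw [hfold]
    refine ⟨hstep.1, ih1, ?_, ih3, ?_, ?_⟩
    · rw [hstep.2 0 (by omega)]
      rfl
    · intro j hj
      exact hstep.2 j hj
    · rw [ih6, hstep.2 A.length le_rfl]
      conv_rhs => rw [List.range'_1_concat]
      rw [List.map_append, List.sum_append, show (1 + (m + 1) : Nat) = m + 2 by omega]
      simp

lemma A_eval (A : List Int) :
    good_subarrays_optim A = ((List.range' 1 A.length).map (fun i => pvCnt A i A.length)).sum := by
  have hdef : good_subarrays_optim A = (pvStA A (A.length - 1)).2.2 := rfl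
  by_cases hn : A.length = 0
  · obtain rfl : A = [] := List.length_eq_zero_iff.mp hn
    rfl
  · obtain ⟨_, _, _, _, _, hcount⟩ := A_outer_aux A (A.length - 1) le_rfl
    rw [hdef, hcount]
    have h1 : A.length - 1 + 1 = A.length := by omega
    rw [h1]

-- the dp vector of B after the first j elements (zeta-reduced body of the port)
def pvDpB (A : List Int) (j : Nat) : List Int :=
  (List.range j).foldl
    (fun dp j =>
      (gsoAltInner (A.getD j 0) (min (j + 1) A.length) dp).set 1
        ((gsoAltInner (A.getD j 0) (min (j + 1) A.length) dp).getD 1 0 + 1))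
    (List.replicate (A.length + 1) 0)

lemma B_outer_aux (A : List Int) :
    ∀ (j : Nat), j ≤ A.length →
      (pvDpB A j).length = A.length + 1 ∧
      ∀ k ≤ A.length, (pvDpB A j).getD k 0 = pvCnt A k j := by
  intro j
  induction j with
  | zero =>
    intro _
    unfold pvDpB
    simp only [List.range_zero, List.foldl_nil]
    refine ⟨by simp, ?_⟩
    intro k hk
    rw [pvCnt_zero_right]
    simp [List.getD_eq_getElem?_getD, Nat.lt_succ_of_le hk]
  | succ j ih =>
    intro hj
    obtain ⟨ihl, ihv⟩ := ih (by omega)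
    have hspec := gsoAltInner_spec A j (pvDpB A j) (by omega) ihl ihv
    have hfold : pvDpB A (j + 1) =
        (gsoAltInner (A.getD j 0) (min (j + 1) A.length) (pvDpB A j)).set 1
          ((gsoAltInner (A.getD j 0) (min (j + 1) A.length) (pvDpB A j)).getD 1 0 + 1) := by
      unfold pvDpB
      rw [List.range_succ, List.foldl_append]
      simp only [List.foldl_cons, List.foldl_nil]
    rw [hfold]
    constructor
    · rw [List.length_set]
      exact hspec.1
    · intro k hk
      rcases Nat.lt_or_ge k 2 with hk2 | hk2
      · interval_cases k
        · rw [getD_set_ne _ _ _ _ (by omega), hspec.2 0 (by omega), if_pos (by omega),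
            pvCnt_zero_left, pvCnt_zero_left]
        · rw [getD_set_self _ _ _ (by omega), hspec.2 1 (by omega), if_pos (by omega)]
          simp [pvCnt]
      · rw [getD_set_ne _ _ _ _ (by omega), hspec.2 k hk, if_neg (by omega)]

lemma range_succ_sum (n : Nat) (f : Nat → Int) :
    ((List.range (n + 1)).map f).sum = f 0 + ((List.range' 1 n).map f).sum := by
  rw [List.range_eq_range', List.range'_succ]
  simp

lemma B_eval (A : List Int) :
    good_subarrays_optim_alt A = ((List.range' 1 A.length).map (fun i => pvCnt A i A.length)).sum := by
  have hdef : good_subarrays_optim_alt A = (pvDpB A A.length).sum := rfl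
  obtain ⟨hl, hv⟩ := B_outer_aux A A.length le_rfl
  rw [hdef, sum_eq_sum_getD, hl]
  have hmap : (List.range (A.length + 1)).map (fun k => (pvDpB A A.length).getD k 0) =
      (List.range (A.length + 1)).map (fun k => pvCnt A k A.length) := by
    apply List.map_congr_left
    intro k hk
    exact hv k (by exact Nat.lt_succ_iff.mp (List.mem_range.mp hk))
  rw [hmap, range_succ_sum, pvCnt_zero_left, zero_add]

-- ===== VERDICT (by name: the statement is the Claim_ definition above) =====
theorem good_subarrays_optim_spec : Claim_equal_good_subarrays_optim := by
  intro A _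
  unfold Spec_good_subarrays_optim
  rw [A_eval, B_eval]
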